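-- pv_equiv track=rewrite | github.com/miliar/Code_Jam_Webscraper | solutions_python/Problem_201/649.py | coverage_level
-- ===== SOURCE A (Python) =====
-- def coverage_level(people_who_pee):
--
--     i = 1
--     level = 0
--     people_left = people_who_pee
--     while(i < people_left):
--         level += 1
--         people_left -= i
--         i *= 2
--
--     return  level, people_left
-- ===== SOURCE B (Python) =====
-- def coverage_level(people_who_pee):
--     n = people_who_pee
--     if n < 1:
--         return 0, n
--     level = n.bit_length() - 1
--     return level, n - (2 ** level - 1)
-- ===== Notes on version B (the rewrite author's own statement) =====
-- stated objective: simpler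
-- what changed: Replaced the doubling subtraction loop with a closed form: for positive input, level = bit_length(n)-1 (= floor(log2 n)) and remainder = n - (2^level - 1); non-positive inputs fall through unchanged exactly as when the loop body never runs.
import Mathlib
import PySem

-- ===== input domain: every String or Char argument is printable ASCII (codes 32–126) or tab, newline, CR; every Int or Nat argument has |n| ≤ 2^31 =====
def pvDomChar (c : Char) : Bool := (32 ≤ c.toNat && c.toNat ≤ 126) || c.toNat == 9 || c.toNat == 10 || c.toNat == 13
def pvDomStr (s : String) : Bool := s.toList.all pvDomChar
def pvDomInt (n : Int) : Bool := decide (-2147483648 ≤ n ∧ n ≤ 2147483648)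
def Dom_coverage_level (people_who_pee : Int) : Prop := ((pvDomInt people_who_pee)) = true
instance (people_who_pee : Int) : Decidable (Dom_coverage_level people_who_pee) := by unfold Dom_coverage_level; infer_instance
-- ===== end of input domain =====

-- B replaces A's doubling-subtraction loop with the closed form (bit_length(n)-1, n - (2^level - 1)); objective: simpler.


-- ===== PORT A =====
-- the while loop, state (i, level, people_left); fuel 64 only makes it total
-- (on the domain |n| ≤ 2^31 the loop runs at most 32 iterations, so fuel is never exhausted)
def coverageAux : Nat → Int → Int → Int → Int × Int
  | 0, _, level, left => (level, left)
  | f + 1, i, level, left =>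
    if i < left then coverageAux f (i * 2) (level + 1) (left - i) else (level, left)

def coverage_level (people_who_pee : Int) : Int × Int :=
  coverageAux 64 1 0 people_who_pee

-- ===== PORT B =====
-- bit_length(n) - 1 for n ≥ 1 is Nat.log2 n.toNat
def coverage_level_alt (people_who_pee : Int) : Int × Int :=
  if people_who_pee < 1 then (0, people_who_pee)
  else
    let level : Nat := Nat.log2 people_who_pee.toNat
    ((level : Int), people_who_pee - ((2 : Int) ^ level - 1))

-- ===== PRECONDITION & SPEC =====
def Spec_coverage_level (people_who_pee : Int) (out : Int × Int) : Prop := out = coverage_level_alt people_who_pee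
instance (people_who_pee : Int) (out : Int × Int) : Decidable (Spec_coverage_level people_who_pee out) := by unfold Spec_coverage_level; infer_instance

-- ===== CLAIM (what is proved, stated in full; the proofs are below) =====
def Claim_equal_coverage_level : Prop := ∀ (people_who_pee : Int), Dom_coverage_level people_who_pee → Spec_coverage_level people_who_pee (coverage_level people_who_pee)

-- ===== LEMMAS AND PROOFS =====

lemma two_pow_int (k : Nat) : ((2 ^ k : Nat) : Int) = (2 : Int) ^ k := by push_cast; ring

-- loop invariant: after k iterations the state is (2^k, k, n - (2^k - 1));
-- with enough fuel the loop computes B's closed form.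
lemma coverageAux_eq (f : Nat) : ∀ (k : Nat) (n : Int),
    (2 : Int) ^ k ≤ n → n < (2 : Int) ^ (k + f) →
    coverageAux f ((2 : Int) ^ k) (k : Int) (n - ((2 : Int) ^ k - 1)) = coverage_level_alt n := by
  induction f with
  | zero =>
    intro k n hk hf
    exact absurd (lt_of_le_of_lt hk hf) (by simp)
  | succ f ih =>
    intro k n hk hf
    by_cases h : (2 : Int) ^ k < n - ((2 : Int) ^ k - 1)
    · -- loop body runs: move to level k+1
      have hk1 : (2 : Int) ^ (k + 1) ≤ n := by
        have : (2 : Int) ^ (k + 1) = 2 ^ k * 2 := by ring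
        omega
      have step : coverageAux (f + 1) ((2:Int)^k) (k : Int) (n - ((2:Int)^k - 1))
          = coverageAux f ((2:Int)^(k+1)) ((k+1 : Nat) : Int) (n - ((2:Int)^(k+1) - 1)) := by
        simp only [coverageAux, if_pos h]
        have e1 : (2:Int)^k * 2 = (2:Int)^(k+1) := by ring
        have e2 : ((k:Int)) + 1 = ((k+1 : Nat) : Int) := by push_cast; ring
        have e3 : n - ((2:Int)^k - 1) - (2:Int)^k = n - ((2:Int)^(k+1) - 1) := by ring
        rw [e1, e2, e3]
      rw [step]
      exact ih (k + 1) n hk1 (by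
        have : k + 1 + f = k + (f + 1) := by omega
        rw [this]; exact hf)
    · -- loop exits: n ≤ 2^(k+1) - 1, so level = log2 n = k
      have hp : (1 : Int) ≤ 2 ^ k := one_le_pow₀ (by norm_num)
      have hn1 : (1 : Int) ≤ n := le_trans hp hk
      have hlt : n < (2 : Int) ^ (k + 1) := by
        have : (2 : Int) ^ (k + 1) = 2 ^ k * 2 := by ring
        omega
      have hNk : 2 ^ k ≤ n.toNat := by
        have := two_pow_int k; omega
      have hNk1 : n.toNat < 2 ^ (k + 1) := by
        have := two_pow_int (k + 1); omega
      have hlog : Nat.log2 n.toNat = k := by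
        rw [Nat.log2_eq_log_two]
        exact Nat.log_eq_of_pow_le_of_lt_pow hNk hNk1
      simp only [coverageAux, if_neg h, coverage_level_alt, if_neg (by omega : ¬ n < 1), hlog]

-- ===== VERDICT (by name: the statement is the Claim_ definition above) =====
theorem coverage_level_spec : Claim_equal_coverage_level := by
  intro n hdom
  unfold Spec_coverage_level
  by_cases h1 : n < 1
  · -- loop never runs
    have : coverage_level n = (0, n) := by
      simp [coverage_level, coverageAux, show ¬ (1 : Int) < n by omega]
    rw [this, coverage_level_alt, if_pos h1]
  · have hk : (2 : Int) ^ 0 ≤ n := by simpa using (by omega : (1 : Int) ≤ n)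
    have hf : n < (2 : Int) ^ (0 + 64) := by
      have hd : -2147483648 ≤ n ∧ n ≤ 2147483648 := by
        simpa [Dom_coverage_level, pvDomInt] using hdom
      have : (2 : Int) ^ (0 + 64) = 18446744073709551616 := by norm_num
      omega
    have := coverageAux_eq 64 0 n hk hf
    simpa [coverage_level] using this
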